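-- pv_equiv track=rewrite | github.com/srgarnett98/scrabblang | board.py | _in_line
-- ===== SOURCE A (Python) =====
-- def _in_line(positions: list[tuple[int, int]]) -> bool:
--     if len(positions) == 0:
--         raise ValueError("empty list of positions to check if in line")
--     row = positions[0][0]
--     col = positions[0][1]
--     for position in positions:
--         if position[0] != row:
--             row = None
--         if position[1] != col:
--             col = None
--     if row is not None or col is not None:
--         return True
--     else:
--         return False
-- ===== SOURCE B (Python) =====
-- def _in_line(positions: list[tuple[int, int]]) -> bool:
--     if len(positions) == 0:
--         raise ValueError("empty list of positions to check if in line")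
--     rows = [p[0] for p in positions]
--     cols = [p[1] for p in positions]
--     return min(rows) == max(rows) or min(cols) == max(cols)
-- ===== Notes on version B (the rewrite author's own statement) =====
-- stated objective: alternative
-- what changed: Replaces A's nullable first-value sentinels mutated in a loop by a degenerate-bounding-box test: the positions are in a line iff min==max on the row coordinates or on the column coordinates, using the integer ordering instead of equality flags.
import Mathlib
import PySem

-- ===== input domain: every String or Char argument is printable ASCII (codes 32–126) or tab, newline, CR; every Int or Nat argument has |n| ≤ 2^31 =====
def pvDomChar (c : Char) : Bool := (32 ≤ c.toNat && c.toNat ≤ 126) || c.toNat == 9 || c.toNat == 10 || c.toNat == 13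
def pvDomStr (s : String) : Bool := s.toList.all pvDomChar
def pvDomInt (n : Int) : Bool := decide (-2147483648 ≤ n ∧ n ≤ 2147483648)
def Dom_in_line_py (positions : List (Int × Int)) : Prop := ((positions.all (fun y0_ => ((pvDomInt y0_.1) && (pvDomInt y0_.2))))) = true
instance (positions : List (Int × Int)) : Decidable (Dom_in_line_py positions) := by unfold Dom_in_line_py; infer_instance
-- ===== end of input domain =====

-- B replaces A's nullable first-value sentinels by a degenerate-bounding-box test
-- (min == max on either coordinate axis); alternative algorithm, same O(n) cost.


-- ===== PORT A =====
-- Literal port of A: track the first row/col as Option Int sentinels, set to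
-- none by the loop on any mismatch ('position[0] != row' is True when row is None).
def in_line_py (positions : List (Int × Int)) : Bool :=
  match positions with
  | [] => false   -- Python raises ValueError here; excluded by Pre_
  | p0 :: _ =>
    let st := positions.foldl
      (fun (rc : Option Int × Option Int) p =>
        (if some p.1 = rc.1 then rc.1 else none,
         if some p.2 = rc.2 then rc.2 else none))
      (some p0.1, some p0.2)
    st.1.isSome || st.2.isSome

-- ===== PORT B =====
-- Literal port of B: both coordinate lists, then min==max on either axis.
-- min?/max? are Python's min/max; on the nonempty lists here both are 'some'.
def in_line_py_alt (positions : List (Int × Int)) : Bool :=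
  match positions with
  | [] => false   -- B raises ValueError here; excluded by Pre_
  | _ :: _ =>
    let rows := positions.map (·.1)
    let cols := positions.map (·.2)
    (PySem.List.min? rows (fun x => x) == PySem.List.max? rows (fun x => x)) ||
    (PySem.List.min? cols (fun x => x) == PySem.List.max? cols (fun x => x))

-- ===== PRECONDITION & SPEC =====
-- Both A and B raise ValueError on the empty list, so it lies outside Pre_.
def Pre_in_line_py (positions : List (Int × Int)) : Prop := positions ≠ []
instance (positions : List (Int × Int)) : Decidable (Pre_in_line_py positions) := by unfold Pre_in_line_py; infer_instance
def pvWitness_in_line_py : (List (Int × Int)) := [(1, 2), (1, 3)]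
def Spec_in_line_py (positions : List (Int × Int)) (out : Bool) : Prop := out = in_line_py_alt positions
instance (positions : List (Int × Int)) (out : Bool) : Decidable (Spec_in_line_py positions out) := by unfold Spec_in_line_py; infer_instance

-- ===== CLAIM (what is proved, stated in full; the proofs are below) =====
def Claim_equal_in_line_py : Prop := ∀ (positions : List (Int × Int)), Dom_in_line_py positions → Pre_in_line_py positions → Spec_in_line_py positions (in_line_py positions)

-- ===== LEMMAS AND PROOFS =====

-- A-side: the pair fold splits into two independent folds.
theorem foldl_pair_split (t : List (Int × Int)) (r c : Option Int) :
    t.foldl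
      (fun (rc : Option Int × Option Int) p =>
        (if some p.1 = rc.1 then rc.1 else none,
         if some p.2 = rc.2 then rc.2 else none))
      (r, c)
    = (t.foldl (fun r p => if some p.1 = r then r else none) r,
       t.foldl (fun c p => if some p.2 = c then c else none) c) := by
  induction t generalizing r c with
  | nil => rfl
  | cons p t ih => simp [List.foldl, ih]

theorem foldl_sentinel_none (f : Int × Int → Int) (t : List (Int × Int)) :
    t.foldl (fun r p => if some (f p) = r then r else none) (none : Option Int) = none := by
  induction t with
  | nil => rfl
  | cons p t ih => simpa using ih

theorem foldl_sentinel_some (f : Int × Int → Int) (t : List (Int × Int)) (r : Int) :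
    t.foldl (fun r p => if some (f p) = r then r else none) (some r)
    = if t.all (fun p => f p == r) then some r else none := by
  induction t with
  | nil => rfl
  | cons p t ih =>
    by_cases h : f p = r
    · have hb : (f p == r) = true := by simp [h]
      rw [List.foldl_cons, if_pos (by rw [h]), ih, List.all_cons, hb, Bool.true_and]
    · rw [List.foldl_cons, if_neg (by simp [h]), foldl_sentinel_none]
      simp [h]

-- B-side: elementary facts about the running-min/running-max folds.
theorem foldl_min_le_init (t : List Int) (h : Int) : t.foldl min h ≤ h := by
  induction t generalizing h with
  | nil => simp
  | cons x t ih => exact le_trans (ih (min h x)) (min_le_left h x)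

theorem init_le_foldl_max (t : List Int) (h : Int) : h ≤ t.foldl max h := by
  induction t generalizing h with
  | nil => simp
  | cons x t ih => exact le_trans (le_max_left h x) (ih (max h x))

theorem foldl_min_le_mem (t : List Int) (h x : Int) (hx : x ∈ t) : t.foldl min h ≤ x := by
  induction t generalizing h with
  | nil => cases hx
  | cons y t ih =>
    rcases List.mem_cons.1 hx with rfl | hx
    · exact le_trans (foldl_min_le_init t (min h x)) (min_le_right h x)
    · exact ih (min h y) hx

theorem mem_le_foldl_max (t : List Int) (h x : Int) (hx : x ∈ t) : x ≤ t.foldl max h := by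
  induction t generalizing h with
  | nil => cases hx
  | cons y t ih =>
    rcases List.mem_cons.1 hx with rfl | hx
    · exact le_trans (le_max_right h x) (init_le_foldl_max t (max h x))
    · exact ih (max h y) hx

-- all equal to the head ⇔ running min equals running max
theorem foldl_eq_of_all (t : List Int) (h : Int) (hall : ∀ x ∈ t, x = h) :
    t.foldl min h = h ∧ t.foldl max h = h := by
  induction t with
  | nil => simp
  | cons y t ih =>
    have hy : y = h := hall y (List.mem_cons_self ..)
    have := ih (fun x hx => hall x (List.mem_cons_of_mem _ hx))
    simp [hy, this]

theorem foldl_min_eq_max_iff (t : List Int) (h : Int) :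
    (t.foldl min h = t.foldl max h) ↔ (∀ x ∈ t, x = h) := by
  constructor
  · intro he
    have h1 : t.foldl min h = h :=
      le_antisymm (foldl_min_le_init t h) (he ▸ init_le_foldl_max t h)
    intro x hx
    exact le_antisymm (h1 ▸ he ▸ mem_le_foldl_max t h x hx) (h1 ▸ foldl_min_le_mem t h x hx)
  · intro hall
    rw [(foldl_eq_of_all t h hall).1, (foldl_eq_of_all t h hall).2]

-- one axis: A's all-equal flag coincides with B's min==max test on that axis
theorem axis_eq (t : List (Int × Int)) (f : Int × Int → Int) (r : Int) :
    (t.all (fun p => f p == r))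
    = ((t.map f).foldl min r == (t.map f).foldl max r) := by
  rw [Bool.eq_iff_iff, beq_iff_eq, foldl_min_eq_max_iff]
  simp only [List.all_eq_true, beq_iff_eq, List.forall_mem_map]

-- ===== VERDICT (by name: the statement is the Claim_ definition above) =====
theorem in_line_py_spec : Claim_equal_in_line_py := by
  intro positions _ hpre
  unfold Spec_in_line_py
  match positions with
  | [] => exact absurd rfl hpre
  | p0 :: t =>
    show in_line_py (p0 :: t) = in_line_py_alt (p0 :: t)
    simp only [in_line_py, in_line_py_alt, List.map_cons]
    rw [List.foldl_cons, foldl_pair_split, if_pos rfl, if_pos rfl,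
        foldl_sentinel_some, foldl_sentinel_some,
        PySem.List.min?_id_cons, PySem.List.max?_id_cons,
        PySem.List.min?_id_cons, PySem.List.max?_id_cons]
    rw [show (fun p : Int × Int => p.1 == p0.1) = (fun p => (fun q : Int × Int => q.1) p == p0.1) from rfl,
        show (fun p : Int × Int => p.2 == p0.2) = (fun p => (fun q : Int × Int => q.2) p == p0.2) from rfl,
        axis_eq t (fun q => q.1) p0.1, axis_eq t (fun q => q.2) p0.2]
    by_cases c1 : (t.map (fun q : Int × Int => q.1)).foldl min p0.1 = (t.map (fun q : Int × Int => q.1)).foldl max p0.1 <;>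
      by_cases c2 : (t.map (fun q : Int × Int => q.2)).foldl min p0.2 = (t.map (fun q : Int × Int => q.2)).foldl max p0.2 <;>
      simp [c1, c2]
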